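-- pv_equiv track=rewrite | github.com/gianmarconaro/advent-of-code-2020 | Day 11/Day11.py | modify_map
-- ===== SOURCE A (Python) =====
-- def modify_map(seat_map):
--     old = seat_map.copy()
--     new = []
--     while True:
--         for line in old:
--             new.append(line.copy())
--         for i in range(len(old)):
--             for j in range(len(old[i])):
--                 if old[i][j] == 'L' and is_occupated(old, i, j) == 0: new[i][j] = '#'
--                 elif old[i][j] == '#' and is_occupated(old, i, j) >= 4: new[i][j] = 'L'
--         if old == new: return new
--         else:
--             old = new.copy()
--             new.clear()
--
-- def is_occupated(seat_map, i, j):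
--     counter = 0
--     for dx in [-1, 0, 1]:
--         for dy in [-1, 0, 1]:
--             if not (dx == 0 and dy == 0) and i+dx >= 0 and i+dx < len(seat_map) and j+dy >= 0 and j+dy < len(seat_map[i+dx]):
--                 if seat_map[i+dx][j+dy] == '#':
--                     counter += 1
--     return counter
-- ===== SOURCE B (Python) =====
-- def modify_map(seat_map):
--     grid = [row.copy() for row in seat_map]
--
--     def neighbours(i, j):
--         res = []
--         for di in (-1, 0, 1):
--             for dj in (-1, 0, 1):
--                 if not (di == 0 and dj == 0):
--                     a, b = i + di, j + dj
--                     if 0 <= a < len(grid) and 0 <= b < len(grid[a]):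
--                         res.append((a, b))
--         return res
--
--     active = [(i, j) for i, row in enumerate(grid)
--               for j, c in enumerate(row) if c == 'L' or c == '#']
--     while active:
--         flips = []
--         for (i, j) in active:
--             n = sum(grid[a][b] == '#' for (a, b) in neighbours(i, j))
--             if grid[i][j] == 'L' and n == 0:
--                 flips.append((i, j, '#'))
--             elif grid[i][j] == '#' and n >= 4:
--                 flips.append((i, j, 'L'))
--         if not flips:
--             break
--         for (i, j, c) in flips:
--             grid[i][j] = c
--         touched = []
--         for (i, j, _) in flips:
--             for p in [(i, j)] + neighbours(i, j):
--                 a, b = p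
--                 if (grid[a][b] == 'L' or grid[a][b] == '#') and p not in touched:
--                     touched.append(p)
--         active = touched
--     return grid
-- ===== Notes on version B (the rewrite author's own statement) =====
-- stated objective: alternative
-- what changed: A recomputes the rule for every cell of a fresh full-grid copy each generation and compares whole grids to stop; B is an event-driven worklist simulation: it keeps an active list of seats that may change, collects only the flips among them, applies them in place, and re-activates just the flipped seats and their seat neighbours, stopping when no flips occur.
import Mathlib
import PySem

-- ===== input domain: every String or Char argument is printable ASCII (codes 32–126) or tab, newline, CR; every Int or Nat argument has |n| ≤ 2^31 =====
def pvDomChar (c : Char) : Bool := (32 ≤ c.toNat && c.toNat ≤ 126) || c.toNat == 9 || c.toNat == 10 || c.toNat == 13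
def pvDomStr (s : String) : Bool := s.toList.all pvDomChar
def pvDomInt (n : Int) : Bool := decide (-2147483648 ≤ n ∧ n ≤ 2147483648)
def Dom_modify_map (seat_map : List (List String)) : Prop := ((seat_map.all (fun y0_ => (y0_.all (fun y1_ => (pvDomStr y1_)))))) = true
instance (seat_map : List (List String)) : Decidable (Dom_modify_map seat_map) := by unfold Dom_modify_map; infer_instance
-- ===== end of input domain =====

-- B replaces A's full-grid-per-generation recomputation by an event-driven worklist:
-- only seats whose neighbourhood changed are re-evaluated each generation (alternative algorithm; same result).


-- fuel for the two unbounded loops: it only makes them total (each port stops at its own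
-- stopping test exactly as its Python does; before the fixpoint the configurations are
-- pairwise distinct, so a terminating run fits in 2^cells generations); both loops
-- advance one generation per fuel step, so they run in lockstep.
def pvFuel (seat_map : List (List String)) : Nat := 2 ^ (seat_map.map List.length).sum + 1

-- ===== PORT A =====
def is_occupated (seat_map : List (List String)) (i j : Int) : Int :=
  ([-1, 0, 1] : List Int).foldl (fun counter dx =>
    ([-1, 0, 1] : List Int).foldl (fun counter dy =>
      if (¬(dx = 0 ∧ dy = 0)) ∧ 0 ≤ i + dx ∧ i + dx < PySem.List.len seat_map ∧
          0 ≤ j + dy ∧ j + dy < PySem.List.len (PySem.List.pyGetD seat_map (i + dx) []) then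
        (if PySem.List.pyGetD (PySem.List.pyGetD seat_map (i + dx) []) (j + dy) "" = "#"
          then counter + 1 else counter)
      else counter) counter) 0

def pvStepA (old : List (List String)) : List (List String) :=
  let new := old.map (fun line => line)
  (PySem.List.pyRange 0 (PySem.List.len old) 1).foldl (fun new i =>
    (PySem.List.pyRange 0 (PySem.List.len (PySem.List.pyGetD old i [])) 1).foldl (fun new j =>
      if PySem.List.pyGetD (PySem.List.pyGetD old i []) j "" = "L" ∧ is_occupated old i j = 0 then
        PySem.List.pySetD new i (PySem.List.pySetD (PySem.List.pyGetD new i []) j "#")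
      else if PySem.List.pyGetD (PySem.List.pyGetD old i []) j "" = "#" ∧ is_occupated old i j ≥ 4 then
        PySem.List.pySetD new i (PySem.List.pySetD (PySem.List.pyGetD new i []) j "L")
      else new) new) new

def pvLoopA : Nat → List (List String) → List (List String)
  | 0, old => old
  | fuel + 1, old =>
    let new := pvStepA old
    if old = new then new else pvLoopA fuel new

def modify_map (seat_map : List (List String)) : List (List String) :=
  pvLoopA (pvFuel seat_map) seat_map

-- ===== PORT B =====
-- grid[a][b] (read-only; every read below is at an in-range coordinate)
def pvCell (g : List (List String)) (i j : Int) : String :=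
  PySem.List.pyGetD (PySem.List.pyGetD g i []) j ""

-- neighbours(i, j): the in-range coordinates of the 8 cells around (i, j)
def pvNeighbours (g : List (List String)) (i j : Int) : List (Int × Int) :=
  ([-1, 0, 1] : List Int).foldl (fun res di =>
    ([-1, 0, 1] : List Int).foldl (fun res dj =>
      if ¬(di = 0 ∧ dj = 0) then
        (if 0 ≤ i + di ∧ i + di < PySem.List.len g ∧ 0 ≤ j + dj ∧
            j + dj < PySem.List.len (PySem.List.pyGetD g (i + di) []) then
          res ++ [(i + di, j + dj)]
        else res)
      else res) res) []

-- one generation's flips, collected from the active seats only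
def pvFlips (g : List (List String)) (active : List (Int × Int)) : List (Int × Int × String) :=
  active.foldl (fun flips p =>
    let n : Int := ((pvNeighbours g p.1 p.2).map
      (fun q => if pvCell g q.1 q.2 = "#" then (1 : Int) else 0)).sum
    if pvCell g p.1 p.2 = "L" ∧ n = 0 then flips ++ [(p.1, p.2, "#")]
    else if pvCell g p.1 p.2 = "#" ∧ n ≥ 4 then flips ++ [(p.1, p.2, "L")]
    else flips) []

-- 'for (i, j, c) in flips: grid[i][j] = c'
def pvApplyFlips (g : List (List String)) (flips : List (Int × Int × String)) :
    List (List String) :=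
  flips.foldl (fun g f =>
    PySem.List.pySetD g f.1 (PySem.List.pySetD (PySem.List.pyGetD g f.1 []) f.2.1 f.2.2)) g

-- the seats to re-examine next generation: flipped seats and their seat neighbours
def pvTouched (g : List (List String)) (flips : List (Int × Int × String)) :
    List (Int × Int) :=
  flips.foldl (fun touched f =>
    ((f.1, f.2.1) :: pvNeighbours g f.1 f.2.1).foldl (fun touched p =>
      if (pvCell g p.1 p.2 = "L" ∨ pvCell g p.1 p.2 = "#") ∧ p ∉ touched then
        touched ++ [p]
      else touched) touched) []

def pvInitActive (g : List (List String)) : List (Int × Int) :=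
  (PySem.List.enumerate g 0).flatMap (fun r =>
    ((PySem.List.enumerate r.2 0).filter (fun q => q.2 == "L" || q.2 == "#")).map
      (fun q => (r.1, q.1)))

def pvLoopBW : Nat → List (List String) → List (Int × Int) → List (List String)
  | 0, g, _ => g
  | fuel + 1, g, active =>
    if active = [] then g
    else
      let flips := pvFlips g active
      if flips = [] then g
      else pvLoopBW fuel (pvApplyFlips g flips) (pvTouched (pvApplyFlips g flips) flips)

def modify_map_alt (seat_map : List (List String)) : List (List String) :=
  let grid := seat_map.map (fun row => row)
  pvLoopBW (pvFuel seat_map) grid (pvInitActive grid)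

-- ===== PRECONDITION & SPEC =====
def Spec_modify_map (seat_map : List (List String)) (out : List (List String)) : Prop :=
  out = modify_map_alt seat_map
instance (seat_map : List (List String)) (out : List (List String)) :
    Decidable (Spec_modify_map seat_map out) := by unfold Spec_modify_map; infer_instance

-- ===== CLAIM =====
def Claim_equal_modify_map : Prop :=
  ∀ (seat_map : List (List String)), Dom_modify_map seat_map →
    Spec_modify_map seat_map (modify_map seat_map)

-- ===== LEMMAS AND PROOFS =====

-- the per-cell rule, and a full synchronous generation, as a specification
def pvRule (g : List (List String)) (i j : Int) (c : String) : String :=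
  if c = "L" ∧ is_occupated g i j = 0 then "#"
  else if c = "#" ∧ is_occupated g i j ≥ 4 then "L" else c

def pvStepSpec (g : List (List String)) : List (List String) :=
  g.mapIdx (fun i row => row.mapIdx (fun j c => pvRule g (i : Int) (j : Int) c))

-- in-bounds coordinate, seat predicate, rule at a coordinate
@[reducible] def pvInB (g : List (List String)) (p : Int × Int) : Prop :=
  0 ≤ p.1 ∧ p.1 < PySem.List.len g ∧ 0 ≤ p.2 ∧
    p.2 < PySem.List.len (PySem.List.pyGetD g p.1 [])

def pvRuleAt (g : List (List String)) (p : Int × Int) : String :=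
  pvRule g p.1 p.2 (pvCell g p.1 p.2)

-- loop invariant of B: active coordinates are in range, and every in-range
-- coordinate outside the active list is already stable under the rule
def pvInv (g : List (List String)) (active : List (Int × Int)) : Prop :=
  (∀ p ∈ active, pvInB g p) ∧
  (∀ p, pvInB g p → p ∉ active → pvRuleAt g p = pvCell g p.1 p.2)

def pvShape (g : List (List String)) : List Nat := g.map List.length

-- ---------- basic indexing bridges ----------
theorem pvRow_eq (g : List (List String)) (i : Nat) (hi : i < g.length) :
    PySem.List.pyGetD g (i : Int) [] = g[i] := by
  simp [List.getD_eq_getElem?_getD, hi]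

theorem pvRowCell_eq (r : List String) (j : Nat) (hj : j < r.length) :
    PySem.List.pyGetD r (j : Int) "" = r[j] := by
  simp [List.getD_eq_getElem?_getD, hj]

theorem pvCell_get (g : List (List String)) (a b : Nat) (ha : a < g.length)
    (hb : b < g[a].length) : pvCell g (a : Int) (b : Int) = g[a][b] := by
  unfold pvCell
  rw [pvRow_eq g a ha, pvRowCell_eq _ b hb]

theorem pvInB_iff (g : List (List String)) (p : Int × Int) :
    pvInB g p ↔ ∃ (a : Nat) (ha : a < g.length) (b : Nat) (hb : b < g[a].length),
      p = ((a : Int), (b : Int)) := by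
  unfold pvInB
  constructor
  · rintro ⟨h1, h2, h3, h4⟩
    simp only [PySem.List.len_eq] at h2
    have ha : p.1.toNat < g.length := by omega
    have hae : p.1 = ((p.1.toNat : Nat) : Int) := by omega
    rw [hae, pvRow_eq g p.1.toNat ha, PySem.List.len_eq] at h4
    have hb : p.2.toNat < (g[p.1.toNat]).length := by omega
    exact ⟨p.1.toNat, ha, p.2.toNat, hb, by ext <;> simp <;> omega⟩
  · rintro ⟨a, ha, b, hb, rfl⟩
    refine ⟨by positivity, ?_, by positivity, ?_⟩
    · simp [PySem.List.len_eq]; exact_mod_cast ha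
    · simp only [pvRow_eq g a ha, PySem.List.len_eq]; exact_mod_cast hb

theorem pvShape_len {g g' : List (List String)} (h : pvShape g' = pvShape g) :
    g'.length = g.length := by
  have := congrArg List.length h
  simpa [pvShape] using this

theorem pvShape_row {g g' : List (List String)} (h : pvShape g' = pvShape g)
    (a : Nat) (ha : a < g.length) :
    (g'[a]'(by rw [pvShape_len h]; exact ha)).length = g[a].length := by
  have h2 := congrArg (fun l => l[a]?) h
  simp only [pvShape, List.getElem?_map] at h2
  rw [List.getElem?_eq_getElem ha, List.getElem?_eq_getElem (by rw [pvShape_len h]; exact ha)] at h2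
  simpa using h2

theorem pvInB_congr {g g' : List (List String)} (h : pvShape g' = pvShape g)
    (p : Int × Int) : pvInB g' p ↔ pvInB g p := by
  rw [pvInB_iff, pvInB_iff]
  constructor
  · rintro ⟨a, ha, b, hb, rfl⟩
    exact ⟨a, by rw [← pvShape_len h]; exact ha, b,
      by rw [← pvShape_row h a (by rw [← pvShape_len h]; exact ha)]; exact hb, rfl⟩
  · rintro ⟨a, ha, b, hb, rfl⟩
    exact ⟨a, by rw [pvShape_len h]; exact ha, b, by rw [pvShape_row h a ha]; exact hb, rfl⟩

theorem pvGrid_ext {g1 g2 : List (List String)} (hs : pvShape g1 = pvShape g2)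
    (hc : ∀ p, pvInB g2 p → pvCell g1 p.1 p.2 = pvCell g2 p.1 p.2) : g1 = g2 := by
  apply List.ext_getElem (pvShape_len hs)
  intro a ha1 ha2
  apply List.ext_getElem (pvShape_row hs a ha2)
  intro b hb1 hb2
  have hp : pvInB g2 ((a : Int), (b : Int)) := (pvInB_iff g2 _).2 ⟨a, ha2, b, hb2, rfl⟩
  have := hc _ hp
  simp only [pvCell_get g2 a b ha2 hb2] at this
  rw [pvCell_get g1 a b ha1 hb1] at this
  exact this

-- ---------- the occupancy count as a window sum ----------
def pvWin : List (Int × Int) :=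
  [(-1,-1),(-1,0),(-1,1),(0,-1),(0,1),(1,-1),(1,0),(1,1)]

def pvOccTerm (g : List (List String)) (i j : Int) (d : Int × Int) : Int :=
  if pvInB g (i + d.1, j + d.2) then
    (if pvCell g (i + d.1) (j + d.2) = "#" then 1 else 0)
  else 0

theorem pv_foldl_count (l : List Int) (G : Int → Prop) [DecidablePred G] (C : Int → Prop)
    [DecidablePred C] (c0 : Int) :
    l.foldl (fun c x => if G x then (if C x then c + 1 else c) else c) c0
      = c0 + (l.map (fun x => if G x then (if C x then (1:Int) else 0) else 0)).sum := by
  induction l generalizing c0 with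
  | nil => simp
  | cons x xs ih => rw [List.foldl_cons, ih, List.map_cons, List.sum_cons]; split_ifs <;> ring

theorem pvOcc_sum (g : List (List String)) (i j : Int) :
    is_occupated g i j = (pvWin.map (pvOccTerm g i j)).sum := by
  unfold is_occupated
  simp only [pv_foldl_count]
  rw [PySem.List.foldl_add]
  simp [pvWin, pvOccTerm, pvInB, pvCell]
  ring_nf

-- neighbours as a flatMap, and B's neighbour sum equals A's is_occupated
theorem pvNbrs_eq_flatMap (g : List (List String)) (i j : Int) :
    pvNeighbours g i j = ([-1, 0, 1] : List Int).flatMap (fun di =>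
      ([-1, 0, 1] : List Int).flatMap (fun dj =>
        if ¬(di = 0 ∧ dj = 0) ∧ pvInB g (i + di, j + dj) then [(i + di, j + dj)] else [])) := by
  unfold pvNeighbours
  have hin : ∀ di : Int, (fun (res : List (Int × Int)) (dj : Int) =>
      if ¬(di = 0 ∧ dj = 0) then
        (if 0 ≤ i + di ∧ i + di < PySem.List.len g ∧ 0 ≤ j + dj ∧
            j + dj < PySem.List.len (PySem.List.pyGetD g (i + di) []) then
          res ++ [(i + di, j + dj)]
        else res)
      else res)
    = fun res dj => res ++ (if ¬(di = 0 ∧ dj = 0) ∧ pvInB g (i + di, j + dj)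
        then [(i + di, j + dj)] else []) := by
    intro di
    funext res dj
    by_cases h1 : ¬(di = 0 ∧ dj = 0)
    · rw [if_pos h1]
      by_cases h2 : 0 ≤ i + di ∧ i + di < PySem.List.len g ∧ 0 ≤ j + dj ∧
          j + dj < PySem.List.len (PySem.List.pyGetD g (i + di) [])
      · rw [if_pos h2,
          if_pos (show ¬(di = 0 ∧ dj = 0) ∧ pvInB g (i + di, j + dj) from ⟨h1, h2⟩)]
      · rw [if_neg h2,
          if_neg (show ¬(¬(di = 0 ∧ dj = 0) ∧ pvInB g (i + di, j + dj)) from fun hx => h2 hx.2),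
          List.append_nil]
    · rw [if_neg h1,
        if_neg (show ¬(¬(di = 0 ∧ dj = 0) ∧ pvInB g (i + di, j + dj)) from fun hx => h1 hx.1),
        List.append_nil]
  simp only [hin, PySem.List.foldl_append_eq_flatMap]
  simp

theorem pv_chunk_sum {α : Type} (C : Prop) [Decidable C] (x : α) (ind : α → Int) :
    ((if C then [x] else []).map ind).sum = if C then ind x else 0 := by
  split_ifs <;> simp

theorem pvNbr_sum (g : List (List String)) (i j : Int) :
    ((pvNeighbours g i j).map
      (fun q => if pvCell g q.1 q.2 = "#" then (1 : Int) else 0)).sum = is_occupated g i j := by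
  rw [pvNbrs_eq_flatMap, pvOcc_sum]
  simp [List.flatMap_cons, List.map_append, List.sum_append, pv_chunk_sum, pvWin, pvOccTerm]

-- ---------- flips as a flatMap of per-seat contributions ----------
def pvContrib (g : List (List String)) (p : Int × Int) : List (Int × Int × String) :=
  if pvCell g p.1 p.2 = "L" ∧ is_occupated g p.1 p.2 = 0 then [(p.1, p.2, "#")]
  else if pvCell g p.1 p.2 = "#" ∧ is_occupated g p.1 p.2 ≥ 4 then [(p.1, p.2, "L")]
  else []

theorem pvFlips_eq_flatMap (g : List (List String)) (active : List (Int × Int)) :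
    pvFlips g active = active.flatMap (pvContrib g) := by
  unfold pvFlips
  have hstep : (fun (flips : List (Int × Int × String)) (p : Int × Int) =>
      let n : Int := ((pvNeighbours g p.1 p.2).map
        (fun q => if pvCell g q.1 q.2 = "#" then (1 : Int) else 0)).sum
      if pvCell g p.1 p.2 = "L" ∧ n = 0 then flips ++ [(p.1, p.2, "#")]
      else if pvCell g p.1 p.2 = "#" ∧ n ≥ 4 then flips ++ [(p.1, p.2, "L")]
      else flips)
    = fun flips p => flips ++ pvContrib g p := by
    funext flips p
    dsimp only
    rw [pvNbr_sum]
    unfold pvContrib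
    split_ifs <;> simp
  rw [hstep, PySem.List.foldl_append_eq_flatMap]
  simp

theorem pvContrib_eq (g : List (List String)) (p : Int × Int) :
    pvContrib g p = if pvRuleAt g p = pvCell g p.1 p.2 then []
      else [(p.1, p.2, pvRuleAt g p)] := by
  unfold pvContrib pvRuleAt pvRule
  by_cases h1 : pvCell g p.1 p.2 = "L" ∧ is_occupated g p.1 p.2 = 0
  · simp [h1]
  · by_cases h2 : pvCell g p.1 p.2 = "#" ∧ is_occupated g p.1 p.2 ≥ 4
    · simp [h2]
    · simp [h1, h2]

theorem pv_mem_flips (g : List (List String)) (active : List (Int × Int))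
    (f : Int × Int × String) (h : f ∈ pvFlips g active) :
    (f.1, f.2.1) ∈ active ∧ f.2.2 = pvRuleAt g (f.1, f.2.1) ∧
      pvRuleAt g (f.1, f.2.1) ≠ pvCell g f.1 f.2.1 := by
  rw [pvFlips_eq_flatMap, List.mem_flatMap] at h
  obtain ⟨p, hp, hf⟩ := h
  rw [pvContrib_eq] at hf
  split_ifs at hf with hr
  · simp at hf
  · simp only [List.mem_singleton] at hf
    subst hf
    exact ⟨hp, rfl, hr⟩

theorem pv_flip_of_active (g : List (List String)) (active : List (Int × Int))
    (p : Int × Int) (hp : p ∈ active) (hne : pvRuleAt g p ≠ pvCell g p.1 p.2) :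
    (p.1, p.2, pvRuleAt g p) ∈ pvFlips g active := by
  rw [pvFlips_eq_flatMap, List.mem_flatMap]
  exact ⟨p, hp, by rw [pvContrib_eq, if_neg hne]; simp⟩

theorem pvFlips_nil_iff (g : List (List String)) (active : List (Int × Int)) :
    pvFlips g active = [] ↔ ∀ p ∈ active, pvRuleAt g p = pvCell g p.1 p.2 := by
  rw [pvFlips_eq_flatMap, List.flatMap_eq_nil_iff]
  constructor
  · intro h p hp
    have := h p hp
    rw [pvContrib_eq] at this
    by_contra hne
    rw [if_neg hne] at this
    simp at this
  · intro h p hp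
    rw [pvContrib_eq, if_pos (h p hp)]

-- ---------- applying flips, cell by cell ----------
theorem pvUpd_shape (g : List (List String)) (fi fj : Int) (v : String)
    (hf : pvInB g (fi, fj)) :
    pvShape (PySem.List.pySetD g fi
      (PySem.List.pySetD (PySem.List.pyGetD g fi []) fj v)) = pvShape g := by
  obtain ⟨a, ha, b, hb, he⟩ := (pvInB_iff g _).1 hf
  have h1 : fi = (a : Int) := congrArg Prod.fst he
  have h2 : fj = (b : Int) := congrArg Prod.snd he
  subst h1; subst h2
  rw [pvRow_eq g a ha, PySem.List.pySetD_natCast, PySem.List.pySetD_natCast]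
  unfold pvShape
  rw [List.map_set]
  apply List.ext_getElem (by simp)
  intro k h1 h2
  rw [List.getElem_set]
  split
  · next heq => subst heq; simp
  · rfl

theorem pvUpd_cell (g : List (List String)) (fi fj : Int) (v : String)
    (hf : pvInB g (fi, fj)) (a b : Nat) (ha : a < g.length) (hb : b < g[a].length) :
    pvCell (PySem.List.pySetD g fi
        (PySem.List.pySetD (PySem.List.pyGetD g fi []) fj v)) (a : Int) (b : Int)
      = if fi = (a : Int) ∧ fj = (b : Int) then v else pvCell g (a : Int) (b : Int) := by
  obtain ⟨a', ha', b', hb', he⟩ := (pvInB_iff g _).1 hf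
  have h1 : fi = (a' : Int) := congrArg Prod.fst he
  have h2 : fj = (b' : Int) := congrArg Prod.snd he
  subst h1; subst h2
  rw [pvRow_eq g a' ha', PySem.List.pySetD_natCast, PySem.List.pySetD_natCast]
  have ha2 : a < (g.set a' (g[a'].set b' v)).length := by simpa using ha
  have hb2 : b < ((g.set a' (g[a'].set b' v))[a]'ha2).length := by
    rw [List.getElem_set]
    split
    · next heq => subst heq; simpa using hb
    · exact hb
  rw [pvCell_get _ a b ha2 hb2, pvCell_get g a b ha hb]
  by_cases haa : a' = a
  · subst haa
    by_cases hbb : b' = b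
    · subst hbb
      rw [if_pos ⟨rfl, rfl⟩]
      simp
    · rw [if_neg (fun h => hbb (by exact_mod_cast h.2))]
      simp [hbb]
  · rw [if_neg (fun h => haa (by exact_mod_cast h.1))]
    simp [haa]

theorem pvApplyFlips_shape (flips : List (Int × Int × String)) (g : List (List String))
    (hf : ∀ f ∈ flips, pvInB g (f.1, f.2.1)) :
    pvShape (pvApplyFlips g flips) = pvShape g := by
  induction flips generalizing g with
  | nil => rfl
  | cons f fs ih =>
    have hfi := hf f List.mem_cons_self
    have hs := pvUpd_shape g f.1 f.2.1 f.2.2 hfi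
    calc pvShape (pvApplyFlips g (f :: fs))
        = pvShape (pvApplyFlips (PySem.List.pySetD g f.1
            (PySem.List.pySetD (PySem.List.pyGetD g f.1 []) f.2.1 f.2.2)) fs) := rfl
      _ = _ := by
          rw [ih _ (fun f' hf' => (pvInB_congr hs _).2 (hf f' (List.mem_cons_of_mem _ hf'))), hs]

theorem pvApplyFlips_cell (flips : List (Int × Int × String)) (g : List (List String))
    (hf : ∀ f ∈ flips, pvInB g (f.1, f.2.1)) (a b : Nat) (ha : a < g.length)
    (hb : b < g[a].length) (v : String)
    (hval : ∀ f ∈ flips, f.1 = (a : Int) ∧ f.2.1 = (b : Int) → f.2.2 = v) :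
    pvCell (pvApplyFlips g flips) (a : Int) (b : Int)
      = if ∃ f ∈ flips, f.1 = (a : Int) ∧ f.2.1 = (b : Int) then v
        else pvCell g (a : Int) (b : Int) := by
  induction flips generalizing g with
  | nil => simp [pvApplyFlips]
  | cons f fs ih =>
    have hfi := hf f List.mem_cons_self
    have hs := pvUpd_shape g f.1 f.2.1 f.2.2 hfi
    have hg' : pvApplyFlips g (f :: fs)
        = pvApplyFlips (PySem.List.pySetD g f.1
            (PySem.List.pySetD (PySem.List.pyGetD g f.1 []) f.2.1 f.2.2)) fs := rfl
    set g' := PySem.List.pySetD g f.1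
      (PySem.List.pySetD (PySem.List.pyGetD g f.1 []) f.2.1 f.2.2) with hg'def
    have ha' : a < g'.length := by rw [pvShape_len hs]; exact ha
    have hb' : b < (g'[a]'ha').length := by rw [pvShape_row hs a ha]; exact hb
    have ihres := ih g' (fun f' hf' => (pvInB_congr hs _).2 (hf f' (List.mem_cons_of_mem _ hf')))
      ha' hb' (fun f' hf' hc => hval f' (List.mem_cons_of_mem _ hf') hc)
    rw [hg', ihres]
    have hcell := pvUpd_cell g f.1 f.2.1 f.2.2 hfi a b ha hb
    by_cases hex : ∃ f' ∈ fs, f'.1 = (a : Int) ∧ f'.2.1 = (b : Int)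
    · obtain ⟨f', hf', hc'⟩ := hex
      rw [if_pos ⟨f', hf', hc'⟩, if_pos ⟨f', List.mem_cons_of_mem _ hf', hc'⟩]
    · rw [if_neg hex, hg'def, hcell]
      by_cases hf0 : f.1 = (a : Int) ∧ f.2.1 = (b : Int)
      · rw [if_pos hf0, if_pos ⟨f, List.mem_cons_self, hf0⟩,
          hval f List.mem_cons_self hf0]
      · rw [if_neg hf0, if_neg ?_]
        rintro ⟨f', hf', hc⟩
        rcases List.mem_cons.1 hf' with rfl | hmem
        · exact hf0 hc
        · exact hex ⟨f', hmem, hc⟩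

theorem pvApplyFlips_cell' (flips : List (Int × Int × String)) (g : List (List String))
    (hf : ∀ f ∈ flips, pvInB g (f.1, f.2.1)) (p : Int × Int) (hp : pvInB g p) (v : String)
    (hval : ∀ f ∈ flips, f.1 = p.1 ∧ f.2.1 = p.2 → f.2.2 = v) :
    pvCell (pvApplyFlips g flips) p.1 p.2
      = if ∃ f ∈ flips, f.1 = p.1 ∧ f.2.1 = p.2 then v else pvCell g p.1 p.2 := by
  obtain ⟨a, ha, b, hb, rfl⟩ := (pvInB_iff g p).1 hp
  exact pvApplyFlips_cell flips g hf a b ha hb v hval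

-- ---------- the spec step: shape and cells ----------
theorem pvStepSpec_length (g : List (List String)) : (pvStepSpec g).length = g.length := by
  simp [pvStepSpec]

theorem pvStepSpec_row (g : List (List String)) (i : Nat) (hi : i < g.length) :
    (pvStepSpec g)[i]'(by rw [pvStepSpec_length]; exact hi)
      = g[i].mapIdx (fun j c => pvRule g (i : Int) (j : Int) c) := by
  unfold pvStepSpec
  rw [List.getElem_mapIdx]

theorem pvStepSpec_rowlen (g : List (List String)) (i : Nat) (hi : i < g.length) :
    ((pvStepSpec g)[i]'(by rw [pvStepSpec_length]; exact hi)).length = g[i].length := by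
  rw [pvStepSpec_row g i hi]
  simp

theorem pvStepSpec_cell (g : List (List String)) (i j : Nat) (hi : i < g.length)
    (hj : j < g[i].length) :
    ((pvStepSpec g)[i]'(by rw [pvStepSpec_length]; exact hi))[j]'(by
        rw [pvStepSpec_rowlen g i hi]; exact hj)
      = pvRule g (i : Int) (j : Int) g[i][j] := by
  rw [List.getElem_of_eq (pvStepSpec_row g i hi), List.getElem_mapIdx]

theorem pvShape_stepSpec (g : List (List String)) : pvShape (pvStepSpec g) = pvShape g := by
  apply List.ext_getElem (by simp [pvShape, pvStepSpec_length])
  intro a h1 h2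
  simp only [pvShape, List.getElem_map] at h1 h2 ⊢
  rw [pvStepSpec_rowlen g a (by simpa [pvStepSpec_length] using h1)]

theorem pvStepSpec_cell_at (g : List (List String)) (p : Int × Int) (hq : pvInB g p) :
    pvCell (pvStepSpec g) p.1 p.2 = pvRuleAt g p := by
  obtain ⟨a, ha, b, hb, rfl⟩ := (pvInB_iff g p).1 hq
  have ha2 : a < (pvStepSpec g).length := by rw [pvStepSpec_length]; exact ha
  have hb2 : b < ((pvStepSpec g)[a]'ha2).length := by rw [pvStepSpec_rowlen g a ha]; exact hb
  show pvCell (pvStepSpec g) (a : Int) (b : Int) = _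
  rw [pvCell_get _ a b ha2 hb2, pvStepSpec_cell g a b ha hb]
  unfold pvRuleAt
  rw [pvCell_get g a b ha hb]

theorem pvRule_nonseat (g : List (List String)) (i j : Int) (c : String)
    (h : ¬(c = "L" ∨ c = "#")) : pvRule g i j c = c := by
  unfold pvRule
  rw [if_neg (fun hx => h (Or.inl hx.1)), if_neg (fun hx => h (Or.inr hx.1))]

-- ---------- A's step equals the spec step (full-grid pass) ----------
theorem pv_getD_mid {α : Type} (pre : List α) (x : α) (suf : List α) (d : α) (n : Nat)
    (hn : pre.length = n) : PySem.List.pyGetD (pre ++ x :: suf) (n : Int) d = x := by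
  subst hn
  simp [List.getD_eq_getElem?_getD]

theorem pv_set_mid {α : Type} (pre : List α) (x y : α) (suf : List α) (n : Nat)
    (hn : pre.length = n) : PySem.List.pySetD (pre ++ x :: suf) (n : Int) y = pre ++ y :: suf := by
  subst hn
  rw [PySem.List.pySetD_natCast, List.set_append_right _ _ (Nat.le_refl _)]
  simp

def pvPartRow (g : List (List String)) (i : Int) (row0 : List String) (m : Nat) : List String :=
  ((row0.take m).mapIdx fun j c => pvRule g i (j : Int) c) ++ row0.drop m

theorem pvPartRow_decomp (g : List (List String)) (i : Int) (row0 : List String) (m : Nat)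
    (hm : m < row0.length) :
    pvPartRow g i row0 m
      = ((row0.take m).mapIdx fun j c => pvRule g i (j : Int) c) ++ row0[m] :: row0.drop (m+1) := by
  unfold pvPartRow
  rw [List.drop_eq_getElem_cons hm]

theorem pvPartRow_succ_decomp (g : List (List String)) (i : Int) (row0 : List String) (m : Nat)
    (hm : m < row0.length) :
    pvPartRow g i row0 (m+1)
      = ((row0.take m).mapIdx fun j c => pvRule g i (j : Int) c)
          ++ pvRule g i (m : Int) row0[m] :: row0.drop (m+1) := by
  unfold pvPartRow
  have ht : row0.take (m+1) = row0.take m ++ [row0[m]] := by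
    rw [List.take_add_one, List.getElem?_eq_getElem hm]; rfl
  rw [ht, List.mapIdx_concat]
  have hl : (row0.take m).length = m := by simp [List.length_take]; omega
  rw [hl]
  simp

theorem pv_inner (g : List (List String)) (pre : List (List String)) (iN : Nat)
    (hpre : pre.length = iN) (row0 : List String)
    (suf : List (List String)) (hrow : PySem.List.pyGetD g (iN : Int) [] = row0)
    (m : Nat) (hm : m ≤ row0.length) :
    (PySem.List.pyRange 0 (m : Int) 1).foldl (fun new j =>
      if PySem.List.pyGetD (PySem.List.pyGetD g (iN : Int) []) j "" = "L" ∧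
          is_occupated g (iN : Int) j = 0 then
        PySem.List.pySetD new (iN : Int)
          (PySem.List.pySetD (PySem.List.pyGetD new (iN : Int) []) j "#")
      else if PySem.List.pyGetD (PySem.List.pyGetD g (iN : Int) []) j "" = "#" ∧
          is_occupated g (iN : Int) j ≥ 4 then
        PySem.List.pySetD new (iN : Int)
          (PySem.List.pySetD (PySem.List.pyGetD new (iN : Int) []) j "L")
      else new) (pre ++ row0 :: suf)
      = pre ++ pvPartRow g (iN : Int) row0 m :: suf := by
  subst hpre
  induction m with
  | zero =>
    rw [show ((0 : Nat) : Int) = 0 by rfl, PySem.List.pyRange_one_eq_nil (le_refl 0)]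
    simp [pvPartRow]
  | succ m ih =>
    have hm' : m < row0.length := hm
    have hc : ((m + 1 : Nat) : Int) = (m : Int) + 1 := by push_cast; ring
    rw [hc, PySem.List.pyRange_one_succ_right (by positivity), List.foldl_append,
      ih (Nat.le_of_lt hm'), List.foldl_cons, List.foldl_nil]
    have hAlen : (((row0.take m).mapIdx fun j c => pvRule g (pre.length : Int) (j : Int) c)).length = m := by
      simp [List.length_mapIdx, List.length_take]; omega
    rw [hrow, pvRowCell_eq row0 m hm']
    by_cases h1 : row0[m] = "L" ∧ is_occupated g (pre.length : Int) (m : Int) = 0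
    · rw [if_pos h1, pv_getD_mid pre _ suf [] pre.length rfl,
        pvPartRow_decomp _ _ _ _ hm',
        pv_set_mid _ _ _ _ m hAlen, pv_set_mid pre _ _ suf pre.length rfl,
        pvPartRow_succ_decomp _ _ _ _ hm', pvRule, if_pos h1]
    · rw [if_neg h1]
      by_cases h2 : row0[m] = "#" ∧ is_occupated g (pre.length : Int) (m : Int) ≥ 4
      · rw [if_pos h2, pv_getD_mid pre _ suf [] pre.length rfl,
          pvPartRow_decomp _ _ _ _ hm',
          pv_set_mid _ _ _ _ m hAlen, pv_set_mid pre _ _ suf pre.length rfl,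
          pvPartRow_succ_decomp _ _ _ _ hm', pvRule, if_neg h1, if_pos h2]
      · rw [if_neg h2, pvPartRow_succ_decomp _ _ _ _ hm', pvRule, if_neg h1, if_neg h2,
          pvPartRow_decomp _ _ _ _ hm']

theorem pvPartRow_full (g : List (List String)) (i : Int) (row0 : List String) :
    pvPartRow g i row0 row0.length = row0.mapIdx fun j c => pvRule g i (j : Int) c := by
  unfold pvPartRow
  simp

def pvPartGrid (g : List (List String)) (m : Nat) : List (List String) :=
  ((g.take m).mapIdx fun i row => row.mapIdx fun j c => pvRule g (i : Int) (j : Int) c) ++ g.drop m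

theorem pvPartGrid_decomp (g : List (List String)) (m : Nat) (hm : m < g.length) :
    pvPartGrid g m
      = ((g.take m).mapIdx fun i row => row.mapIdx fun j c => pvRule g (i : Int) (j : Int) c)
          ++ g[m] :: g.drop (m+1) := by
  unfold pvPartGrid
  rw [List.drop_eq_getElem_cons hm]

theorem pvPartGrid_succ_decomp (g : List (List String)) (m : Nat) (hm : m < g.length) :
    pvPartGrid g (m+1)
      = ((g.take m).mapIdx fun i row => row.mapIdx fun j c => pvRule g (i : Int) (j : Int) c)
          ++ (g[m].mapIdx fun j c => pvRule g (m : Int) (j : Int) c) :: g.drop (m+1) := by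
  unfold pvPartGrid
  have ht : g.take (m+1) = g.take m ++ [g[m]] := by
    rw [List.take_add_one, List.getElem?_eq_getElem hm]; rfl
  rw [ht, List.mapIdx_concat]
  have hl : (g.take m).length = m := by simp [List.length_take]; omega
  rw [hl]
  simp

theorem pv_outer (g : List (List String)) (m : Nat) (hm : m ≤ g.length) :
    (PySem.List.pyRange 0 (m : Int) 1).foldl (fun new i =>
      (PySem.List.pyRange 0 (PySem.List.len (PySem.List.pyGetD g i [])) 1).foldl (fun new j =>
        if PySem.List.pyGetD (PySem.List.pyGetD g i []) j "" = "L" ∧ is_occupated g i j = 0 then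
          PySem.List.pySetD new i (PySem.List.pySetD (PySem.List.pyGetD new i []) j "#")
        else if PySem.List.pyGetD (PySem.List.pyGetD g i []) j "" = "#" ∧ is_occupated g i j ≥ 4 then
          PySem.List.pySetD new i (PySem.List.pySetD (PySem.List.pyGetD new i []) j "L")
        else new) new) g
      = pvPartGrid g m := by
  induction m with
  | zero =>
    rw [show ((0 : Nat) : Int) = 0 by rfl, PySem.List.pyRange_one_eq_nil (le_refl 0)]
    simp [pvPartGrid]
  | succ m ih =>
    have hm' : m < g.length := hm
    have hc : ((m + 1 : Nat) : Int) = (m : Int) + 1 := by push_cast; ring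
    rw [hc, PySem.List.pyRange_one_succ_right (by positivity), List.foldl_append,
      ih (Nat.le_of_lt hm'), List.foldl_cons, List.foldl_nil]
    have hAlen : (((g.take m).mapIdx fun i row => row.mapIdx fun j c =>
        pvRule g (i : Int) (j : Int) c)).length = m := by
      simp [List.length_mapIdx, List.length_take]; omega
    have hlen : PySem.List.len (PySem.List.pyGetD g (m : Int) [])
        = ((g[m].length : Nat) : Int) := by
      rw [pvRow_eq g m hm', PySem.List.len_eq]
    rw [pvPartGrid_decomp _ _ hm', hlen,
      pv_inner g _ m hAlen g[m] _ (pvRow_eq g m hm') g[m].length (le_refl _),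
      pvPartRow_full, pvPartGrid_succ_decomp _ _ hm']

theorem pvStepA_eq_spec (g : List (List String)) : pvStepA g = pvStepSpec g := by
  unfold pvStepA
  have hid : (g.map fun line => line) = g := by simp
  rw [hid, PySem.List.len_eq, pv_outer g g.length (le_refl _)]
  unfold pvPartGrid pvStepSpec
  simp

-- ---------- B's sparse step equals the spec step ----------
theorem pv_step_eq (g : List (List String)) (active : List (Int × Int))
    (hInv : pvInv g active) : pvApplyFlips g (pvFlips g active) = pvStepSpec g := by
  have hfInB : ∀ f ∈ pvFlips g active, pvInB g (f.1, f.2.1) :=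
    fun f hmem => hInv.1 _ (pv_mem_flips g active f hmem).1
  apply pvGrid_ext
  · rw [pvApplyFlips_shape _ _ hfInB, pvShape_stepSpec]
  · intro p hp
    have hpg : pvInB g p := (pvInB_congr (pvShape_stepSpec g) p).1 hp
    rw [pvStepSpec_cell_at g p hpg]
    obtain ⟨a, ha, b, hb, rfl⟩ := (pvInB_iff g p).1 hpg
    rw [pvApplyFlips_cell _ g hfInB a b ha hb (pvRuleAt g ((a : Int), (b : Int)))
      (fun f hf hc => by
        have := (pv_mem_flips g active f hf).2.1
        rw [this, hc.1, hc.2])]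
    by_cases hex : ∃ f ∈ pvFlips g active, f.1 = (a : Int) ∧ f.2.1 = (b : Int)
    · rw [if_pos hex]
    · rw [if_neg hex]
      by_cases hact : ((a : Int), (b : Int)) ∈ active
      · by_contra hne
        exact hex ⟨_, pv_flip_of_active g active _ hact (fun h => hne h.symm), rfl, rfl⟩
      · exact (hInv.2 _ hpg hact).symm

theorem pv_stop_iff (g : List (List String)) (active : List (Int × Int))
    (hInv : pvInv g active) : pvFlips g active = [] ↔ pvStepSpec g = g := by
  constructor
  · intro h
    apply pvGrid_ext (pvShape_stepSpec g)
    intro p hp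
    rw [pvStepSpec_cell_at g p hp]
    by_cases hact : p ∈ active
    · exact (pvFlips_nil_iff g active).1 h p hact
    · exact hInv.2 p hp hact
  · intro h
    rw [pvFlips_nil_iff]
    intro p hp
    have hpg := hInv.1 p hp
    have := pvStepSpec_cell_at g p hpg
    rw [h] at this
    exact this.symm

-- ---------- membership in neighbours and in the touched list ----------
theorem pv_mem_nbrs (g : List (List String)) (i j : Int) (q : Int × Int) :
    q ∈ pvNeighbours g i j ↔ ∃ di ∈ ([-1, 0, 1] : List Int), ∃ dj ∈ ([-1, 0, 1] : List Int),
      ¬(di = 0 ∧ dj = 0) ∧ pvInB g (i + di, j + dj) ∧ q = (i + di, j + dj) := by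
  rw [pvNbrs_eq_flatMap]
  simp only [List.mem_flatMap]
  constructor
  · rintro ⟨di, hdi, dj, hdj, hq⟩
    split_ifs at hq with hc
    · simp only [List.mem_singleton] at hq
      exact ⟨di, hdi, dj, hdj, hc.1, hc.2, hq⟩
    · simp at hq
  · rintro ⟨di, hdi, dj, hdj, h1, h2, rfl⟩
    exact ⟨di, hdi, dj, hdj, by rw [if_pos ⟨h1, h2⟩]; simp⟩

theorem pv_mem_foldl_dedup {α : Type} [BEq α] [LawfulBEq α] (P : α → Prop) [DecidablePred P]
    (l : List α) (acc : List α) (q : α) :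
    q ∈ l.foldl (fun acc x => if P x ∧ x ∉ acc then acc ++ [x] else acc) acc
      ↔ q ∈ acc ∨ (q ∈ l ∧ P q) := by
  induction l generalizing acc with
  | nil => simp
  | cons x xs ih =>
    rw [List.foldl_cons, ih]
    by_cases hx : P x ∧ x ∉ acc
    · rw [if_pos hx]
      simp only [List.mem_append, List.mem_cons, List.not_mem_nil, or_false]
      constructor
      · rintro ((h | rfl) | ⟨h1, h2⟩)
        · exact Or.inl h
        · exact Or.inr ⟨Or.inl rfl, hx.1⟩
        · exact Or.inr ⟨Or.inr h1, h2⟩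
      · rintro (h | ⟨(rfl | h1), h2⟩)
        · exact Or.inl (Or.inl h)
        · exact Or.inl (Or.inr rfl)
        · exact Or.inr ⟨h1, h2⟩
    · rw [if_neg hx]
      push_neg at hx
      simp only [List.mem_cons]
      constructor
      · rintro (h | ⟨h1, h2⟩)
        · exact Or.inl h
        · exact Or.inr ⟨Or.inr h1, h2⟩
      · rintro (h | ⟨(rfl | h1), h2⟩)
        · exact Or.inl h
        · exact Or.inl (hx h2)
        · exact Or.inr ⟨h1, h2⟩

theorem pv_mem_touched_inner (g : List (List String)) (cand acc : List (Int × Int))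
    (q : Int × Int) :
    q ∈ cand.foldl (fun touched p =>
        if (pvCell g p.1 p.2 = "L" ∨ pvCell g p.1 p.2 = "#") ∧ p ∉ touched then
          touched ++ [p]
        else touched) acc
      ↔ q ∈ acc ∨ (q ∈ cand ∧ (pvCell g q.1 q.2 = "L" ∨ pvCell g q.1 q.2 = "#")) :=
  pv_mem_foldl_dedup _ cand acc q

theorem pv_mem_touched (g : List (List String)) (flips : List (Int × Int × String))
    (q : Int × Int) :
    q ∈ pvTouched g flips
      ↔ (pvCell g q.1 q.2 = "L" ∨ pvCell g q.1 q.2 = "#") ∧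
        ∃ f ∈ flips, q = (f.1, f.2.1) ∨ q ∈ pvNeighbours g f.1 f.2.1 := by
  unfold pvTouched
  suffices h : ∀ acc : List (Int × Int), q ∈ flips.foldl (fun touched f =>
      ((f.1, f.2.1) :: pvNeighbours g f.1 f.2.1).foldl (fun touched p =>
        if (pvCell g p.1 p.2 = "L" ∨ pvCell g p.1 p.2 = "#") ∧ p ∉ touched then
          touched ++ [p]
        else touched) touched) acc
    ↔ q ∈ acc ∨ ((pvCell g q.1 q.2 = "L" ∨ pvCell g q.1 q.2 = "#") ∧
        ∃ f ∈ flips, q = (f.1, f.2.1) ∨ q ∈ pvNeighbours g f.1 f.2.1) by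
    rw [h []]
    simp
  induction flips with
  | nil => intro acc; simp
  | cons f fs ih =>
    intro acc
    rw [List.foldl_cons, ih, pv_mem_touched_inner]
    simp only [List.mem_cons]
    constructor
    · rintro ((h | ⟨h1, h2⟩) | ⟨hs', f', hf', hx⟩)
      · exact Or.inl h
      · exact Or.inr ⟨h2, ⟨f, Or.inl rfl, h1⟩⟩
      · exact Or.inr ⟨hs', ⟨f', Or.inr hf', hx⟩⟩
    · rintro (h | ⟨hs', f', (rfl | hf'), hx⟩)
      · exact Or.inl (Or.inl h)
      · exact Or.inl (Or.inr ⟨hx, hs'⟩)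
      · exact Or.inr ⟨hs', f', hf', hx⟩

-- ---------- locality of the neighbour count ----------
theorem pvOcc_congr (g g' : List (List String)) (i j : Int)
    (hs : pvShape g' = pvShape g)
    (hc : ∀ d ∈ pvWin, pvInB g (i + d.1, j + d.2) →
      pvCell g' (i + d.1) (j + d.2) = pvCell g (i + d.1) (j + d.2)) :
    is_occupated g' i j = is_occupated g i j := by
  rw [pvOcc_sum, pvOcc_sum]
  apply congrArg
  apply List.map_congr_left
  intro d hd
  unfold pvOccTerm
  by_cases hIn : pvInB g (i + d.1, j + d.2)
  · rw [if_pos ((pvInB_congr hs _).2 hIn), if_pos hIn, hc d hd hIn]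
  · rw [if_neg (fun h => hIn ((pvInB_congr hs _).1 h)), if_neg hIn]

theorem pvRule_congr (g g' : List (List String)) (i j : Int) (c : String)
    (h : is_occupated g' i j = is_occupated g i j) : pvRule g' i j c = pvRule g i j c := by
  unfold pvRule
  rw [h]

theorem pvWin_facts : ∀ d ∈ pvWin, (-d.1) ∈ ([-1, 0, 1] : List Int) ∧
    (-d.2) ∈ ([-1, 0, 1] : List Int) ∧ ¬(-d.1 = 0 ∧ -d.2 = 0) := by decide

-- ---------- the invariant is preserved ----------
theorem pv_inv_step (g : List (List String)) (active : List (Int × Int))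
    (hInv : pvInv g active) :
    pvInv (pvStepSpec g) (pvTouched (pvStepSpec g) (pvFlips g active)) := by
  set g' := pvStepSpec g with hg'
  set flips := pvFlips g active with hflips
  have hs : pvShape g' = pvShape g := pvShape_stepSpec g
  have hfInB : ∀ f ∈ flips, pvInB g (f.1, f.2.1) :=
    fun f hmem => hInv.1 _ (pv_mem_flips g active f hmem).1
  have hApply : pvApplyFlips g flips = g' := pv_step_eq g active hInv
  constructor
  · intro q hq
    rw [pv_mem_touched] at hq
    obtain ⟨hseat, f, hf, hcase⟩ := hq
    rcases hcase with rfl | hnb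
    · exact (pvInB_congr hs _).2 (hfInB f hf)
    · rw [pv_mem_nbrs] at hnb
      obtain ⟨di, _, dj, _, _, hIn, rfl⟩ := hnb
      exact hIn
  · intro q hqInB hnq
    by_cases hseat : pvCell g' q.1 q.2 = "L" ∨ pvCell g' q.1 q.2 = "#"
    · rw [pv_mem_touched] at hnq
      push_neg at hnq
      have hno : ∀ f ∈ flips, q ≠ (f.1, f.2.1) ∧ q ∉ pvNeighbours g' f.1 f.2.1 := hnq hseat
      have hqg : pvInB g q := (pvInB_congr hs q).1 hqInB
      -- a cell with no flip on it keeps its value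
      have hkey : ∀ p : Int × Int, pvInB g p →
          (∀ f ∈ flips, ¬(f.1 = p.1 ∧ f.2.1 = p.2)) →
          pvCell g' p.1 p.2 = pvCell g p.1 p.2 := by
        intro p hp hnof
        rw [← hApply, pvApplyFlips_cell' flips g hfInB p hp ""
          (fun f hf hc => absurd hc (hnof f hf)),
          if_neg (by rintro ⟨f, hf, hc⟩; exact hnof f hf hc)]
      have hq_ne : ∀ f ∈ flips, ¬(f.1 = q.1 ∧ f.2.1 = q.2) := by
        intro f hf hc
        exact (hno f hf).1 (by rw [hc.1, hc.2, Prod.mk.eta])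
      have hcellq : pvCell g' q.1 q.2 = pvCell g q.1 q.2 := hkey q hqg hq_ne
      -- no neighbour of q changed either
      have hnbcell : ∀ d ∈ pvWin, pvInB g (q.1 + d.1, q.2 + d.2) →
          pvCell g' (q.1 + d.1) (q.2 + d.2) = pvCell g (q.1 + d.1) (q.2 + d.2) := by
        intro d hd hIn
        apply hkey _ hIn
        intro f hf hc
        have hc1 : f.1 = q.1 + d.1 := hc.1
        have hc2 : f.2.1 = q.2 + d.2 := hc.2
        apply (hno f hf).2
        rw [pv_mem_nbrs]
        obtain ⟨hw1, hw2, hw3⟩ := pvWin_facts d hd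
        have h1' : f.1 + -d.1 = q.1 := by rw [hc1]; ring
        have h2' : f.2.1 + -d.2 = q.2 := by rw [hc2]; ring
        have hpair : (f.1 + -d.1, f.2.1 + -d.2) = q := by rw [h1', h2', Prod.mk.eta]
        exact ⟨-d.1, hw1, -d.2, hw2, hw3, by rw [hpair]; exact hqInB, hpair.symm⟩
      have hocc : is_occupated g' q.1 q.2 = is_occupated g q.1 q.2 :=
        pvOcc_congr g g' q.1 q.2 hs hnbcell
      have hRg : pvRuleAt g q = pvCell g q.1 q.2 := by
        by_cases hact : q ∈ active
        · by_contra hne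
          have hmem := pv_flip_of_active g active q hact hne
          exact (hno _ hmem).1 (Prod.mk.eta).symm
        · exact hInv.2 q hqg hact
      unfold pvRuleAt
      rw [hcellq, pvRule_congr g g' q.1 q.2 _ hocc]
      exact hRg
    · unfold pvRuleAt
      exact pvRule_nonseat g' q.1 q.2 _ hseat

-- ---------- the two loops run in lockstep ----------
theorem pv_loop_sync : ∀ (fuel : Nat) (g : List (List String)) (active : List (Int × Int)),
    pvInv g active → pvLoopBW fuel g active = pvLoopA fuel g := by
  intro fuel
  induction fuel with
  | zero => intro g active _; rfl
  | succ f ih =>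
    intro g active hInv
    simp only [pvLoopBW, pvLoopA]
    by_cases hact : active = []
    · subst hact
      have hfl : pvFlips g [] = [] := rfl
      have hstop : pvStepSpec g = g := (pv_stop_iff g [] hInv).1 hfl
      rw [if_pos rfl, if_pos (by rw [pvStepA_eq_spec, hstop]), pvStepA_eq_spec, hstop]
    · rw [if_neg hact]
      by_cases hfl : pvFlips g active = []
      · have hstop : pvStepSpec g = g := (pv_stop_iff g active hInv).1 hfl
        rw [if_pos hfl, if_pos (by rw [pvStepA_eq_spec, hstop]), pvStepA_eq_spec, hstop]
      · have hstop : ¬ g = pvStepA g := by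
          rw [pvStepA_eq_spec]
          intro h
          exact hfl ((pv_stop_iff g active hInv).2 h.symm)
        rw [if_neg hfl, if_neg hstop, pvStepA_eq_spec]
        have hstep := pv_step_eq g active hInv
        rw [hstep]
        exact ih (pvStepSpec g) _ (pv_inv_step g active hInv)

-- ---------- the initial active list ----------
theorem pv_mem_init (g : List (List String)) (q : Int × Int) :
    q ∈ pvInitActive g ↔ ∃ (a : Nat) (ha : a < g.length) (b : Nat) (hb : b < g[a].length),
      q = ((a : Int), (b : Int)) ∧ (g[a][b] = "L" ∨ g[a][b] = "#") := by
  unfold pvInitActive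
  rw [List.mem_flatMap]
  constructor
  · rintro ⟨r, hr, hq⟩
    rw [PySem.List.mem_enumerate_iff] at hr
    obtain ⟨a, ha, rfl⟩ := hr
    rw [List.mem_map] at hq
    obtain ⟨p, hp, hpe⟩ := hq
    rw [List.mem_filter] at hp
    obtain ⟨hp, hP⟩ := hp
    rw [PySem.List.mem_enumerate_iff] at hp
    obtain ⟨b, hb, rfl⟩ := hp
    simp only [beq_iff_eq, Bool.or_eq_true] at hP
    exact ⟨a, ha, b, hb, by rw [← hpe]; ext <;> simp, hP⟩
  · rintro ⟨a, ha, b, hb, rfl, hP⟩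
    refine ⟨((a : Int), g[a]), ?_, ?_⟩
    · rw [PySem.List.mem_enumerate_iff]
      exact ⟨a, ha, by simp⟩
    · rw [List.mem_map]
      refine ⟨((b : Int), g[a][b]), ?_, by simp⟩
      rw [List.mem_filter, PySem.List.mem_enumerate_iff]
      exact ⟨⟨b, hb, by simp⟩, by simpa using hP⟩

theorem pv_init_inv (g : List (List String)) : pvInv g (pvInitActive g) := by
  constructor
  · intro p hp
    rw [pv_mem_init] at hp
    obtain ⟨a, ha, b, hb, rfl, _⟩ := hp
    exact (pvInB_iff g _).2 ⟨a, ha, b, hb, rfl⟩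
  · intro p hp hnp
    obtain ⟨a, ha, b, hb, rfl⟩ := (pvInB_iff g p).1 hp
    have hns : ¬(g[a][b] = "L" ∨ g[a][b] = "#") := by
      intro hseat
      exact hnp ((pv_mem_init g _).2 ⟨a, ha, b, hb, rfl, hseat⟩)
    unfold pvRuleAt
    have hcell : pvCell g ((a : Int)) ((b : Int)) = g[a][b] := pvCell_get g a b ha hb
    show pvRule g (a : Int) (b : Int) (pvCell g (a : Int) (b : Int)) = _
    rw [hcell]
    exact pvRule_nonseat g _ _ _ hns

-- ===== VERDICT =====
theorem modify_map_spec : Claim_equal_modify_map := by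
  intro seat_map _
  unfold Spec_modify_map modify_map modify_map_alt
  have hid : (seat_map.map fun row => row) = seat_map := by simp
  simp only [hid]
  exact (pv_loop_sync (pvFuel seat_map) seat_map (pvInitActive seat_map)
    (pv_init_inv seat_map)).symm
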